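-- pv_equiv track=rewrite | github.com/glennatlayla/fxlab | services/api/services/strategy_service.py | _resolver_location_to_pointer
-- ===== SOURCE A (Python) =====
-- def _resolver_location_to_pointer(location: str) -> str:
--     """
--     Convert a :class:`ReferenceResolver` dotted location into a JSON pointer.
--
--     The resolver emits locations like
--     ``entry_logic.long.conditions[0].lhs`` and
--     ``indicators[3].mean_source``; the validate-IR contract pins paths
--     to JSON pointer form so the frontend's error renderer is uniform.
--     Bracket indices and dotted segments are both flattened into pointer
--     segments.
--
--     Args:
--         location: Resolver location hint.
--
--     Returns:
--         A leading-slash JSON pointer. ``"/"`` when the location is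
--         blank.
--
--     Example:
--         >>> _resolver_location_to_pointer("entry_logic.long.conditions[0].lhs")
--         '/entry_logic/long/conditions/0/lhs'
--         >>> _resolver_location_to_pointer("indicators[3].mean_source")
--         '/indicators/3/mean_source'
--     """
--     if not location:
--         return "/"
--     # Replace [N] with .N, then split on '.', drop empties so consecutive
--     # separators don't yield blank segments.
--     normalised = location.replace("[", ".").replace("]", "")
--     parts = [seg for seg in normalised.split(".") if seg]
--     if not parts:
--         return "/"
--     escaped = [seg.replace("~", "~0").replace("/", "~1") for seg in parts]
--     return "/" + "/".join(escaped)
-- ===== SOURCE B (Python) =====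
-- def _resolver_location_to_pointer(location: str) -> str:
--     """Single left-to-right scan: '.' and '[' flush the current segment,
--     ']' is skipped, every other character is escaped inline."""
--     segs = []
--     buf = ""
--     for c in location:
--         if c == "." or c == "[":
--             if buf:
--                 segs.append(buf)
--             buf = ""
--         elif c == "]":
--             continue
--         elif c == "~":
--             buf += "~0"
--         elif c == "/":
--             buf += "~1"
--         else:
--             buf += c
--     if buf:
--         segs.append(buf)
--     if not segs:
--         return "/"
--     return "/" + "/".join(segs)
-- ===== Notes on version B (the rewrite author's own statement) =====
-- stated objective: alternative
-- what changed: Replaces A's four-stage pipeline (two global replaces, split on the dot separator, filter, per-segment double-replace escaping, join) by a single left-to-right character scan that flushes a segment buffer at separator characters, drops closing brackets and escapes each character inline.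
import Mathlib
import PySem

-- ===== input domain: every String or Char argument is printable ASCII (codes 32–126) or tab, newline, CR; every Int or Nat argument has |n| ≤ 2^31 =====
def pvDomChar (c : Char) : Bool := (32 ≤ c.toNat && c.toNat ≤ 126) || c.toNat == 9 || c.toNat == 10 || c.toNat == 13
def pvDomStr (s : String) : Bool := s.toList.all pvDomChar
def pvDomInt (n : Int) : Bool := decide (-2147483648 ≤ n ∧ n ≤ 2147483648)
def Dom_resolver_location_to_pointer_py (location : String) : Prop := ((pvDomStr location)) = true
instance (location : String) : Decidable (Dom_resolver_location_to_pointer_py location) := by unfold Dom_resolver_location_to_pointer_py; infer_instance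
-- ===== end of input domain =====

-- B replaces A's replace/split/filter/escape pipeline by one left-to-right character scan
-- with a segment buffer (objective: alternative single-pass decomposition; similar cost).


-- ===== PORT A =====
def resolver_location_to_pointer_py (location : String) : String :=
  if location.toList = [] then "/"
  else
    let normalised := PySem.Str.replace (PySem.Str.replace location "[" ".") "]" ""
    let parts := (PySem.Chars.splitOn normalised.toList ['.']).filter (fun seg => seg ≠ [])
    if parts = [] then "/"
    else
      let escaped := parts.map (fun seg =>
        PySem.Chars.replace (PySem.Chars.replace seg ['~'] ['~', '0']) ['/'] ['~', '1'])
      String.ofList ('/' :: PySem.Chars.join ['/'] escaped)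

-- ===== PORT B =====
def pvEsc (c : Char) : List Char :=
  if c = '~' then ['~', '0'] else if c = '/' then ['~', '1'] else [c]

def pvScan : List Char → List Char → List (List Char) → List (List Char)
  | [], buf, segs => if buf = [] then segs else segs ++ [buf]
  | c :: rest, buf, segs =>
    if c = '.' ∨ c = '[' then pvScan rest [] (if buf = [] then segs else segs ++ [buf])
    else if c = ']' then pvScan rest buf segs
    else pvScan rest (buf ++ pvEsc c) segs

def resolver_location_to_pointer_py_alt (location : String) : String :=
  let segs := pvScan location.toList [] []
  if segs = [] then "/"
  else String.ofList ('/' :: PySem.Chars.join ['/'] segs)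

-- ===== PRECONDITION & SPEC =====
def Spec_resolver_location_to_pointer_py (location : String) (out : String) : Prop := out = resolver_location_to_pointer_py_alt location
instance (location : String) (out : String) : Decidable (Spec_resolver_location_to_pointer_py location out) := by unfold Spec_resolver_location_to_pointer_py; infer_instance

-- ===== CLAIM (what is proved, stated in full; the proofs are below) =====
def Claim_equal_resolver_location_to_pointer_py : Prop := ∀ (location : String), Dom_resolver_location_to_pointer_py location → Spec_resolver_location_to_pointer_py location (resolver_location_to_pointer_py location)

-- ===== LEMMAS AND PROOFS =====

-- single-character old: Python s.replace(a, w) is a per-character flatMap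
theorem replace_go_single (a : Char) (w : List Char) :
    ∀ (fuel : Nat) (l acc : List Char), l.length ≤ fuel →
      PySem.Chars.replace.go [a] w fuel l acc
        = acc.reverse ++ l.flatMap (fun c => if c = a then w else [c]) := by
  intro fuel
  induction fuel with
  | zero =>
      intro l acc h
      have : l = [] := List.length_eq_zero_iff.mp (Nat.le_zero.mp h)
      subst this; simp [PySem.Chars.replace.go]
  | succ n ih =>
      intro l acc h
      cases l with
      | nil => simp [PySem.Chars.replace.go]
      | cons c t =>
          simp only [PySem.Chars.replace.go]
          by_cases hc : c = a
          · subst hc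
            rw [if_pos (show ([c].isPrefixOf (c :: t)) = true by simp [List.isPrefixOf])]
            rw [show List.drop ([c] : List Char).length (c :: t) = t from rfl]
            rw [ih t (w.reverse ++ acc) (by simpa using Nat.le_of_succ_le_succ h)]
            simp
          · rw [if_neg (show ¬ (([a].isPrefixOf (c :: t)) = true) by
              simp [List.isPrefixOf]; exact fun hh => hc hh.symm)]
            rw [ih t (c :: acc) (by simpa using Nat.le_of_succ_le_succ h)]
            simp [hc]

theorem replace_single (a : Char) (w s : List Char) :
    PySem.Chars.replace s [a] w = s.flatMap (fun c => if c = a then w else [c]) := by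
  unfold PySem.Chars.replace
  rw [if_neg (show ¬ (([a] : List Char).isEmpty = true) by simp)]
  rw [replace_go_single a w s.length s [] (le_refl _)]
  simp

-- structural reformulation of single-char splitOn
def pvSplitF : List Char → List Char → List (List Char)
  | [], cur => [cur]
  | c :: t, cur => if c = '.' then cur :: pvSplitF t [] else pvSplitF t (cur ++ [c])

theorem splitOn_go_single :
    ∀ (fuel : Nat) (l cur : List Char) (acc : List (List Char)), l.length ≤ fuel →
      PySem.Chars.splitOn.go ['.'] fuel l cur acc
        = acc.reverse ++ pvSplitF l cur.reverse := by
  intro fuel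
  induction fuel with
  | zero =>
      intro l cur acc h
      have : l = [] := List.length_eq_zero_iff.mp (Nat.le_zero.mp h)
      subst this; simp [PySem.Chars.splitOn.go, pvSplitF]
  | succ n ih =>
      intro l cur acc h
      cases l with
      | nil => simp [PySem.Chars.splitOn.go, pvSplitF]
      | cons c t =>
          simp only [PySem.Chars.splitOn.go]
          by_cases hc : c = '.'
          · subst hc
            rw [if_pos (show (['.'].isPrefixOf ('.' :: t)) = true by simp [List.isPrefixOf])]
            rw [show List.drop (['.'] : List Char).length ('.' :: t) = t from rfl]
            rw [ih t [] (cur.reverse :: acc) (by simpa using Nat.le_of_succ_le_succ h)]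
            simp [pvSplitF]
          · rw [if_neg (show ¬ ((['.'].isPrefixOf (c :: t)) = true) by
              simp [List.isPrefixOf]; exact fun hh => hc hh.symm)]
            rw [ih t (c :: cur) acc (by simpa using Nat.le_of_succ_le_succ h)]
            simp [pvSplitF, hc]

theorem splitOn_single (s : List Char) :
    PySem.Chars.splitOn s ['.'] = pvSplitF s [] := by
  unfold PySem.Chars.splitOn
  rw [splitOn_go_single (s.length + 1) s [] [] (Nat.le_succ _)]
  simp

-- the per-character normalisation performed by A's two replaces
def pvNorm (c : Char) : List Char :=
  if c = '[' then ['.'] else if c = ']' then [] else [c]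

theorem norm_eq (s : List Char) :
    PySem.Chars.replace (PySem.Chars.replace s ['['] ['.']) [']'] []
      = s.flatMap pvNorm := by
  rw [replace_single, replace_single, List.flatMap_assoc]
  congr 1
  funext c
  by_cases h1 : c = '['
  · subst h1; simp [pvNorm]
  · by_cases h2 : c = ']'
    · subst h2; simp [pvNorm]
    · simp [pvNorm, h1, h2]

-- A's two escape replaces are the per-character escape pvEsc
theorem escape_eq (s : List Char) :
    PySem.Chars.replace (PySem.Chars.replace s ['~'] ['~', '0']) ['/'] ['~', '1']
      = s.flatMap pvEsc := by
  rw [replace_single, replace_single, List.flatMap_assoc]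
  congr 1
  funext c
  by_cases h1 : c = '~'
  · subst h1; simp [pvEsc]
  · by_cases h2 : c = '/'
    · subst h2; simp [pvEsc, h1]
    · simp [pvEsc, h1, h2]

-- the segment list B's scan computes, without the accumulator
def pvF : List Char → List Char → List (List Char)
  | [], buf => if buf = [] then [] else [buf]
  | c :: t, buf =>
    if c = '.' ∨ c = '[' then (if buf = [] then [] else [buf]) ++ pvF t []
    else if c = ']' then pvF t buf
    else pvF t (buf ++ pvEsc c)

theorem scan_eq_F : ∀ (cs buf : List Char) (segs : List (List Char)),
    pvScan cs buf segs = segs ++ pvF cs buf := by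
  intro cs
  induction cs with
  | nil => intro buf segs; by_cases h : buf = [] <;> simp [pvScan, pvF, h]
  | cons c t ih =>
      intro buf segs
      by_cases h1 : c = '.' ∨ c = '['
      · by_cases h2 : buf = [] <;> simp [pvScan, pvF, h1, h2, ih, List.append_assoc]
      · by_cases h3 : c = ']' <;> simp [pvScan, pvF, h1, h3, ih]

theorem pvEsc_ne_nil (c : Char) : pvEsc c ≠ [] := by
  unfold pvEsc; split_ifs <;> simp

theorem flatMap_esc_eq_nil_iff (l : List Char) : l.flatMap pvEsc = [] ↔ l = [] := by
  cases l with
  | nil => simp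
  | cons c t => simp [List.flatMap_cons]; intro h; exact absurd h (pvEsc_ne_nil c)

-- main invariant: split-then-filter-then-escape equals the scan's segment list
theorem main_inv : ∀ (cs cur : List Char),
    ((pvSplitF (cs.flatMap pvNorm) cur).filter (fun seg => seg ≠ [])).map
        (fun seg => seg.flatMap pvEsc)
      = pvF cs (cur.flatMap pvEsc) := by
  intro cs
  induction cs with
  | nil =>
      intro cur
      by_cases h : cur = []
      · subst h; simp [pvSplitF, pvF]
      · have h2 : cur.flatMap pvEsc ≠ [] := fun hh => h ((flatMap_esc_eq_nil_iff cur).mp hh)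
        simp [pvSplitF, pvF, h, h2]
  | cons c t ih =>
      intro cur
      have ih' := ih []
      simp only [List.flatMap_nil] at ih'
      by_cases h1 : c = '.' ∨ c = '['
      · have hn : pvNorm c = ['.'] := by
          rcases h1 with h | h <;> subst h <;> simp [pvNorm]
        have hF : pvF (c :: t) (cur.flatMap pvEsc)
            = (if cur.flatMap pvEsc = [] then [] else [cur.flatMap pvEsc]) ++ pvF t [] := by
          rcases h1 with h | h <;> subst h <;> simp [pvF]
        rw [List.flatMap_cons, hn, List.singleton_append, hF]
        have hsp : pvSplitF ('.' :: t.flatMap pvNorm) cur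
            = cur :: pvSplitF (t.flatMap pvNorm) [] := by simp [pvSplitF]
        rw [hsp, List.filter_cons]
        by_cases h2 : cur = []
        · subst h2
          rw [if_neg (by simp)]
          rw [ih']
          simp
        · have h3 : cur.flatMap pvEsc ≠ [] := fun hh => h2 ((flatMap_esc_eq_nil_iff cur).mp hh)
          rw [if_pos (by simp [h2])]
          rw [List.map_cons, ih']
          rw [if_neg h3]
          rfl
      · by_cases h2 : c = ']'
        · subst h2
          rw [List.flatMap_cons, show pvNorm ']' = [] by simp [pvNorm]]
          simp only [List.nil_append]
          rw [ih cur]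
          simp [pvF]
        · have hb : c ≠ '[' := fun h => h1 (Or.inr h)
          have hd : c ≠ '.' := fun h => h1 (Or.inl h)
          have hn : pvNorm c = [c] := by simp [pvNorm, hb, h2]
          rw [List.flatMap_cons, hn, List.singleton_append]
          have hsp : pvSplitF (c :: t.flatMap pvNorm) cur
              = pvSplitF (t.flatMap pvNorm) (cur ++ [c]) := by simp [pvSplitF, hd]
          rw [hsp, ih (cur ++ [c])]
          simp [pvF, h1, h2, List.flatMap_append]

-- ===== VERDICT (by name: the statement is the Claim_ definition above) =====
theorem resolver_location_to_pointer_py_spec : Claim_equal_resolver_location_to_pointer_py := by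
  intro location _
  show resolver_location_to_pointer_py location = resolver_location_to_pointer_py_alt location
  unfold resolver_location_to_pointer_py resolver_location_to_pointer_py_alt
  dsimp only
  have hsegs : pvScan location.toList [] [] = pvF location.toList [] := by
    simpa using scan_eq_F location.toList [] []
  have hnorm : (PySem.Str.replace (PySem.Str.replace location "[" ".") "]" "").toList
      = location.toList.flatMap pvNorm := by
    simp only [PySem.Str.replace, String.toList_ofList]
    exact norm_eq location.toList
  have hmap : ((PySem.Chars.splitOn (location.toList.flatMap pvNorm) ['.']).filter
        (fun seg => seg ≠ [])).map
        (fun seg => PySem.Chars.replace (PySem.Chars.replace seg ['~'] ['~', '0']) ['/'] ['~', '1'])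
      = pvF location.toList [] := by
    rw [splitOn_single]
    calc ((pvSplitF (location.toList.flatMap pvNorm) []).filter (fun seg => seg ≠ [])).map
          (fun seg => PySem.Chars.replace (PySem.Chars.replace seg ['~'] ['~', '0']) ['/'] ['~', '1'])
        = ((pvSplitF (location.toList.flatMap pvNorm) []).filter (fun seg => seg ≠ [])).map
          (fun seg => seg.flatMap pvEsc) := by
          apply List.map_congr_left; intro seg _; exact escape_eq seg
      _ = pvF location.toList (([] : List Char).flatMap pvEsc) := main_inv location.toList []
      _ = pvF location.toList [] := by rw [List.flatMap_nil]
  by_cases hempty : location.toList = []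
  · rw [if_pos hempty]
    have hs : pvScan location.toList [] [] = [] := by rw [hempty]; rfl
    rw [hs, if_pos rfl]
  · rw [if_neg hempty, hnorm]
    by_cases hp : ((PySem.Chars.splitOn (location.toList.flatMap pvNorm) ['.']).filter
        (fun seg => seg ≠ [])) = []
    · rw [if_pos hp]
      have hF : pvF location.toList [] = [] := by rw [← hmap, hp]; rfl
      rw [hsegs, hF, if_pos rfl]
    · rw [if_neg hp, hsegs]
      have hF : pvF location.toList [] ≠ [] :=
        fun hh => hp (List.map_eq_nil_iff.mp (hmap.trans hh))
      rw [if_neg hF, hmap]
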